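-- pv_equiv track=rewrite | github.com/johnny-2123/Leetcode_Solutions | 2615-make-number-of-distinct-characters-equal/make-number-of-distinct-characters-equal.py | isItPossible
-- ===== SOURCE A (Python) =====
-- from collections import Counter
--
-- def isItPossible(word1: str, word2: str) -> bool:
--     word1 = sorted(word1)
--     word2 = sorted(word2)
--     str1Counter = Counter(word1)
--     str2Counter = Counter(word2)
--     distinctCount1 = len(list(str1Counter.keys()))
--     distinctCount2 = len(list(str2Counter.keys()))
--
--     for i, char1 in enumerate(word1):
--         if i > 0 and char1 == word1[i - 1]:
--             continue
--         for k, char2 in enumerate(word2):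
--             if k > 0 and char2 == word2[k -1]:
--                 continue
--             # take char1 out of str1
--             str1Counter[char1] -= 1
--             if str1Counter[char1] == 0:
--                 distinctCount1 -= 1
--             #add char1 to str2
--             if str2Counter.get(char1, 0) > 0:
--                 str2Counter[char1] += 1
--             else:
--                 str2Counter[char1] = 1
--                 distinctCount2 += 1
--             #take char2 out of str2
--             str2Counter[char2] -= 1
--             if str2Counter[char2] == 0:
--                 distinctCount2 -= 1
--             #add char2 to str1
--             if str1Counter.get(char2, 0) > 0:
--                 str1Counter[char2] += 1
--             else:
--                 str1Counter[char2] = 1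
--                 distinctCount1 += 1
--
--             if distinctCount1 == distinctCount2:
--                 return True
--
--             # Reverse the operations to undo the changes
--             str1Counter[char1] += 1
--             if str1Counter[char1] == 1:
--                 distinctCount1 += 1
--
--             str2Counter[char1] -= 1
--             if str2Counter[char1] == 0:
--                 distinctCount2 -= 1
--
--             str2Counter[char2] += 1
--             if str2Counter[char2] == 1:
--                 distinctCount2 += 1
--
--             str1Counter[char2] -= 1
--             if str1Counter[char2] == 0:
--                 distinctCount1 -= 1
--
--     return False
-- ===== SOURCE B (Python) =====
-- from collections import Counter
--
-- def isItPossible(word1: str, word2: str) -> bool: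
--     cnt1, cnt2 = Counter(word1), Counter(word2)
--     d1, d2 = len(cnt1), len(cnt2)
--     # swapping a shared character is a no-op on the distinct counts
--     if d1 == d2 and any(c in cnt2 for c in cnt1):
--         return True
--     # classify each character by how swapping it away changes its word's distinct count:
--     # g = (it occurs exactly once here) + (it is absent from the other word), in {0,1,2}
--     cls1 = [(c, (n == 1) + (c not in cnt2)) for c, n in cnt1.items()]
--     cls2 = [(c, (n == 1) + (c not in cnt1)) for c, n in cnt2.items()]
--     for t in range(3):
--         s = t + d2 - d1
--         if not 0 <= s <= 2:
--             continue
--         b1 = [c for c, g in cls1 if g == t]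
--         b2 = [c for c, g in cls2 if g == s]
--         if b1 and b2 and not (len(b1) == 1 and b1 == b2):
--             return True
--     return False
-- ===== Notes on version B (the rewrite author's own statement) =====
-- stated objective: faster
-- what changed: B abandons A's try-every-character-pair mutate/test/undo search: it classifies each distinct character once by g = (occurs once) + (absent from other word), buckets the alphabets by g, and decides by a constant-size scan over the three bucket indices (plus a shared-character no-op check), with a singleton-bucket test replacing the c1!=c2 constraint.
import Mathlib
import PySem

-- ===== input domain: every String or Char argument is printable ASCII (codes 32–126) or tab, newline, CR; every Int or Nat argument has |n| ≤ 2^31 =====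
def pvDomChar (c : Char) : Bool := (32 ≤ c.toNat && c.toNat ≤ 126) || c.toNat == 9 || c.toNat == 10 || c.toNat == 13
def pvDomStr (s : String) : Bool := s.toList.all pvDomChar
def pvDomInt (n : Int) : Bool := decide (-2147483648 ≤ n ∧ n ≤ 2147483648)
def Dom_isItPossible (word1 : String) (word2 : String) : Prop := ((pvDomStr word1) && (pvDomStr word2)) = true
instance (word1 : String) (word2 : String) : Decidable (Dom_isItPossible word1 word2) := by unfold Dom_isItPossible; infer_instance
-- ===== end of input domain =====

-- B drops A's try-every-character-pair mutate/test/undo search: it classifies each distinct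
-- character once by g = (occurs once) + (absent from the other word) and decides from the three
-- resulting buckets (plus a shared-character no-op check); objective: faster (no pair enumeration).

-- ===== PORT A =====
-- literal transliteration of A; Counter subscript read = getD _ 0, Counter __setitem__ = insert.
-- One swap attempt: mutate the two counters and distinct counts, test, and (on failure) undo.
-- 'counter[c] -= 1; if counter[c] == 0: d -= 1'  (the two take-out statements of A)
def pvDec (s : PySem.Dict Char Int) (d : Int) (c : Char) : PySem.Dict Char Int × Int :=
  let s := s.insert c (s.getD c 0 - 1)
  (s, if s.getD c 0 == 0 then d - 1 else d)

-- 'counter[c] += 1; if counter[c] == 1: d += 1'  (the two put-back statements of A's undo)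
def pvInc (s : PySem.Dict Char Int) (d : Int) (c : Char) : PySem.Dict Char Int × Int :=
  let s := s.insert c (s.getD c 0 + 1)
  (s, if s.getD c 0 == 1 then d + 1 else d)

-- 'if counter.get(c, 0) > 0: counter[c] += 1 else: counter[c] = 1; d += 1'  (A's add statements)
def pvAddB (s : PySem.Dict Char Int) (d : Int) (c : Char) : PySem.Dict Char Int × Int :=
  if s.getD c 0 > 0 then (s.insert c (s.getD c 0 + 1), d) else (s.insert c 1, d + 1)

-- one swap attempt of A's inner loop body: mutate, test 'distinctCount1 == distinctCount2',
-- and on failure undo the four mutations in A's order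
def pvStepA (st : PySem.Dict Char Int × PySem.Dict Char Int × Int × Int) (char1 char2 : Char) :
    Bool × (PySem.Dict Char Int × PySem.Dict Char Int × Int × Int) :=
  let p1 := pvDec st.1 st.2.2.1 char1          -- take char1 out of str1
  let p2 := pvAddB st.2.1 st.2.2.2 char1       -- add char1 to str2
  let p2 := pvDec p2.1 p2.2 char2              -- take char2 out of str2
  let p1 := pvAddB p1.1 p1.2 char2             -- add char2 to str1
  if p1.2 == p2.2 then (true, (p1.1, p2.1, p1.2, p2.2))
  else
    -- Reverse the operations to undo the changes
    let p1 := pvInc p1.1 p1.2 char1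
    let p2 := pvDec p2.1 p2.2 char1
    let p2 := pvInc p2.1 p2.2 char2
    let p1 := pvDec p1.1 p1.2 char2
    (false, (p1.1, p2.1, p1.2, p2.2))

-- inner 'for k, char2 in enumerate(word2)' loop ('word2[k-1]' is guarded by k > 0, so the
-- pyGetD default ' ' is never read)
def pvInnerA (w2 : List Char) (char1 : Char) :
    List (Int × Char) → (PySem.Dict Char Int × PySem.Dict Char Int × Int × Int) →
    Bool × (PySem.Dict Char Int × PySem.Dict Char Int × Int × Int)
  | [], st => (false, st)
  | (k, char2) :: rest, st =>
    if k > 0 && (PySem.List.pyGetD w2 (k - 1) ' ' == char2) then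
      pvInnerA w2 char1 rest st
    else
      match pvStepA st char1 char2 with
      | (true, st') => (true, st')
      | (false, st') => pvInnerA w2 char1 rest st'

-- outer 'for i, char1 in enumerate(word1)' loop
def pvOuterA (w1 w2 : List Char) :
    List (Int × Char) → (PySem.Dict Char Int × PySem.Dict Char Int × Int × Int) → Bool
  | [], _ => false
  | (i, char1) :: rest, st =>
    if i > 0 && (PySem.List.pyGetD w1 (i - 1) ' ' == char1) then
      pvOuterA w1 w2 rest st
    else
      match pvInnerA w2 char1 (PySem.List.enumerate w2) st with
      | (true, _) => true
      | (false, st') => pvOuterA w1 w2 rest st'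

def isItPossible (word1 : String) (word2 : String) : Bool :=
  let w1 := PySem.List.sorted word1.toList (fun c => c) false
  let w2 := PySem.List.sorted word2.toList (fun c => c) false
  let str1Counter := PySem.Dict.counter w1
  let str2Counter := PySem.Dict.counter w2
  let distinctCount1 : Int := str1Counter.keys.length
  let distinctCount2 : Int := str2Counter.keys.length
  pvOuterA w1 w2 (PySem.List.enumerate w1) (str1Counter, str2Counter, distinctCount1, distinctCount2)

-- ===== PORT B =====
-- literal transliteration of Source B: classify every distinct character once, then decide from the
-- three buckets; 'for t in range(3): … return True … return False' is the any over pyRange 0 3 1,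
-- with 'continue' as the false branch.
def isItPossible_alt (word1 : String) (word2 : String) : Bool :=
  let cnt1 := PySem.Dict.counter word1.toList
  let cnt2 := PySem.Dict.counter word2.toList
  let d1 : Int := cnt1.size
  let d2 : Int := cnt2.size
  if d1 == d2 && cnt1.keys.any (fun c => cnt2.contains c) then true
  else
    let cls1 := cnt1.items.map (fun p =>
      (p.1, (if p.2 == 1 then (1 : Int) else 0) + (if cnt2.contains p.1 then 0 else 1)))
    let cls2 := cnt2.items.map (fun p =>
      (p.1, (if p.2 == 1 then (1 : Int) else 0) + (if cnt1.contains p.1 then 0 else 1)))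
    (PySem.List.pyRange 0 3 1).any (fun t =>
      let s := t + d2 - d1
      if 0 ≤ s ∧ s ≤ 2 then
        let b1 := (cls1.filter (fun p => p.2 == t)).map Prod.fst
        let b2 := (cls2.filter (fun p => p.2 == s)).map Prod.fst
        !b1.isEmpty && !b2.isEmpty && !(b1.length == 1 && b1 == b2)
      else false)

-- ===== PRECONDITION & SPEC =====
def Spec_isItPossible (word1 : String) (word2 : String) (out : Bool) : Prop := out = isItPossible_alt word1 word2
instance (word1 : String) (word2 : String) (out : Bool) : Decidable (Spec_isItPossible word1 word2 out) := by unfold Spec_isItPossible; infer_instance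

-- ===== CLAIM (what is proved, stated in full; the proofs are below) =====
def Claim_equal_isItPossible : Prop := ∀ (word1 : String) (word2 : String), Dom_isItPossible word1 word2 → Spec_isItPossible word1 word2 (isItPossible word1 word2)

-- ===== LEMMAS AND PROOFS =====

def pvD (x : List Char) : Int := ((PySem.Set.ofList x).length : Int)
-- the effect of swapping c1 (from word1) against c2 (from word2) on the two distinct counts
def pvP (x y : List Char) (c1 c2 : Char) : Bool :=
  if c1 == c2 then pvD x == pvD y
  else (pvD x - (if (x.count c1 : Int) == 1 then 1 else 0) + (if x.contains c2 then 0 else 1))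
    == (pvD y - (if (y.count c2 : Int) == 1 then 1 else 0) + (if y.contains c1 then 0 else 1))
def pvInv (x y : List Char) (st : PySem.Dict Char Int × PySem.Dict Char Int × Int × Int) : Prop :=
  (∀ c, st.1.getD c 0 = (x.count c : Int)) ∧ (∀ c, st.2.1.getD c 0 = (y.count c : Int)) ∧
  st.2.2.1 = pvD x ∧ st.2.2.2 = pvD y
-- B's classification values
def pvG1 (x y : List Char) (c : Char) : Int :=
  (if (x.count c : Int) == 1 then 1 else 0) + (if y.contains c then 0 else 1)
def pvG2 (x y : List Char) (c : Char) : Int :=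
  (if (y.count c : Int) == 1 then 1 else 0) + (if x.contains c then 0 else 1)

lemma pvDec_getD (s : PySem.Dict Char Int) (d : Int) (c c' : Char) :
    (pvDec s d c).1.getD c' 0 = if c' = c then s.getD c 0 - 1 else s.getD c' 0 := by
  simp [pvDec, PySem.Dict.getD_insert]
lemma pvDec_d (s : PySem.Dict Char Int) (d : Int) (c : Char) :
    (pvDec s d c).2 = if s.getD c 0 - 1 = 0 then d - 1 else d := by
  simp [pvDec]
lemma pvInc_getD (s : PySem.Dict Char Int) (d : Int) (c c' : Char) :
    (pvInc s d c).1.getD c' 0 = if c' = c then s.getD c 0 + 1 else s.getD c' 0 := by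
  simp [pvInc, PySem.Dict.getD_insert]
lemma pvInc_d (s : PySem.Dict Char Int) (d : Int) (c : Char) :
    (pvInc s d c).2 = if s.getD c 0 + 1 = 1 then d + 1 else d := by
  simp [pvInc]
lemma pvAddB_getD (s : PySem.Dict Char Int) (d : Int) (c c' : Char) :
    (pvAddB s d c).1.getD c' 0 = if c' = c then (if s.getD c 0 > 0 then s.getD c 0 + 1 else 1) else s.getD c' 0 := by
  by_cases h : s.getD c 0 > 0 <;> simp [pvAddB, h, PySem.Dict.getD_insert]
lemma pvAddB_d (s : PySem.Dict Char Int) (d : Int) (c : Char) :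
    (pvAddB s d c).2 = if s.getD c 0 > 0 then d else d + 1 := by
  simp only [pvAddB]; split_ifs <;> rfl
set_option maxHeartbeats 1000000 in
lemma pvStepA_spec (x y : List Char) (st : PySem.Dict Char Int × PySem.Dict Char Int × Int × Int)
    (h : pvInv x y st) (c1 c2 : Char) (h1 : c1 ∈ x) (h2 : c2 ∈ y) :
    (pvStepA st c1 c2).1 = pvP x y c1 c2 ∧
    (pvP x y c1 c2 = false → pvInv x y (pvStepA st c1 c2).2) := by
  obtain ⟨s1, s2, d1, d2⟩ := st
  obtain ⟨hs1, hs2, hd1, hd2⟩ := h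
  simp only at hs1 hs2 hd1 hd2
  subst hd1 hd2
  have ha : 0 < x.count c1 := List.count_pos_iff.2 h1
  have hb : 0 < y.count c2 := List.count_pos_iff.2 h2
  have hcy : (c1 ∈ y) ↔ 0 < y.count c1 := List.count_pos_iff.symm
  have hcx : (c2 ∈ x) ↔ 0 < x.count c2 := List.count_pos_iff.symm
  simp only [pvStepA]
  generalize hg1 : pvDec s1 (pvD x) c1 = t1
  generalize hg2 : pvAddB s2 (pvD y) c1 = t2
  generalize hg3 : pvDec t2.1 t2.2 c2 = t3
  generalize hg4 : pvAddB t1.1 t1.2 c2 = t4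
  have k1g : ∀ c, t1.1.getD c 0 = if c = c1 then (x.count c1 : Int) - 1 else (x.count c : Int) := by
    intro c; simp only [← hg1, pvDec_getD, hs1]
  have k1d : t1.2 = if (x.count c1 : Int) - 1 = 0 then pvD x - 1 else pvD x := by
    simp only [← hg1, pvDec_d, hs1]
  have k2g : ∀ c, t2.1.getD c 0 =
      if c = c1 then (if (y.count c1 : Int) > 0 then (y.count c1 : Int) + 1 else 1)
      else (y.count c : Int) := by
    intro c; simp only [← hg2, pvAddB_getD, hs2]
  have k2d : t2.2 = if (y.count c1 : Int) > 0 then pvD y else pvD y + 1 := by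
    simp only [← hg2, pvAddB_d, hs2]
  have k3g : ∀ c, t3.1.getD c 0 = if c = c2 then t2.1.getD c2 0 - 1 else t2.1.getD c 0 := by
    intro c; simp only [← hg3, pvDec_getD]
  have k3d : t3.2 = if t2.1.getD c2 0 - 1 = 0 then t2.2 - 1 else t2.2 := by
    simp only [← hg3, pvDec_d]
  have k4g : ∀ c, t4.1.getD c 0 =
      if c = c2 then (if t1.1.getD c2 0 > 0 then t1.1.getD c2 0 + 1 else 1)
      else t1.1.getD c 0 := by
    intro c; simp only [← hg4, pvAddB_getD]
  have k4d : t4.2 = if t1.1.getD c2 0 > 0 then t1.2 else t1.2 + 1 := by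
    simp only [← hg4, pvAddB_d]
  have e2 : (x.contains c2 = true) = (0 < x.count c2) := by
    rw [eq_iff_iff, List.contains_iff_mem]; exact List.count_pos_iff.symm
  have e1 : (y.contains c1 = true) = (0 < y.count c1) := by
    rw [eq_iff_iff, List.contains_iff_mem]; exact List.count_pos_iff.symm
  have hflag : (t4.2 == t3.2) = pvP x y c1 c2 := by
    by_cases hc : c1 = c2
    · subst hc
      simp only [k4d, k3d, k1d, k2d, k1g, k2g, pvP, beq_self_eq_true, if_true, e1]
      clear k1g k1d k2g k2d k3g k3d k4g k4d e1 e2 hs1 hs2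
      rw [Bool.eq_iff_iff]
      simp only [beq_iff_eq]
      split_ifs <;> omega
    · simp only [k4d, k3d, k1d, k2d, k1g, k2g, pvP, beq_iff_eq, if_neg hc,
        if_neg (Ne.symm hc), e1, e2]
      clear k1g k1d k2g k2d k3g k3d k4g k4d e1 e2 hs1 hs2
      rw [Bool.eq_iff_iff]
      simp only [beq_iff_eq]
      split_ifs <;> omega
  rw [hflag]
  refine ⟨by split_ifs with hv <;> simp [hv], fun hP => ?_⟩
  rw [if_neg (by simp [hP])]
  generalize hg5 : pvInc t4.1 t4.2 c1 = t5
  generalize hg6 : pvDec t3.1 t3.2 c1 = t6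
  generalize hg7 : pvInc t6.1 t6.2 c2 = t7
  generalize hg8 : pvDec t5.1 t5.2 c2 = t8
  have k5g : ∀ c, t5.1.getD c 0 = if c = c1 then t4.1.getD c1 0 + 1 else t4.1.getD c 0 := by
    intro c; simp only [← hg5, pvInc_getD]
  have k5d : t5.2 = if t4.1.getD c1 0 + 1 = 1 then t4.2 + 1 else t4.2 := by
    simp only [← hg5, pvInc_d]
  have k6g : ∀ c, t6.1.getD c 0 = if c = c1 then t3.1.getD c1 0 - 1 else t3.1.getD c 0 := by
    intro c; simp only [← hg6, pvDec_getD]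
  have k6d : t6.2 = if t3.1.getD c1 0 - 1 = 0 then t3.2 - 1 else t3.2 := by
    simp only [← hg6, pvDec_d]
  have k7g : ∀ c, t7.1.getD c 0 = if c = c2 then t6.1.getD c2 0 + 1 else t6.1.getD c 0 := by
    intro c; simp only [← hg7, pvInc_getD]
  have k7d : t7.2 = if t6.1.getD c2 0 + 1 = 1 then t6.2 + 1 else t6.2 := by
    simp only [← hg7, pvInc_d]
  have k8g : ∀ c, t8.1.getD c 0 = if c = c2 then t5.1.getD c2 0 - 1 else t5.1.getD c 0 := by
    intro c; simp only [← hg8, pvDec_getD]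
  have k8d : t8.2 = if t5.1.getD c2 0 - 1 = 0 then t5.2 - 1 else t5.2 := by
    simp only [← hg8, pvDec_d]
  clear hg1 hg2 hg3 hg4 hg5 hg6 hg7 hg8
  refine ⟨fun c => ?_, fun c => ?_, ?_, ?_⟩
  · show t8.1.getD c 0 = _
    simp only [k8g, k5g, k4g, k1g]
    clear k1g k1d k2g k2d k3g k3d k4g k4d k5g k5d k6g k6d k7g k7d k8g k8d e1 e2 hflag hP hs1 hs2
    split_ifs <;> first | omega | (subst_vars; omega) | (subst_vars; tauto)
  · show t7.1.getD c 0 = _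
    simp only [k7g, k6g, k3g, k2g]
    clear k1g k1d k2g k2d k3g k3d k4g k4d k5g k5d k6g k6d k7g k7d k8g k8d e1 e2 hflag hP hs1 hs2
    split_ifs <;> first | omega | (subst_vars; omega) | (subst_vars; tauto)
  · show t8.2 = _
    simp only [k8d, k5g, k5d, k4g, k4d, k1g, k1d]
    clear k1g k1d k2g k2d k3g k3d k4g k4d k5g k5d k6g k6d k7g k7d k8g k8d e1 e2 hflag hP hs1 hs2
    split_ifs <;> first | omega | (subst_vars; omega) | (subst_vars; tauto)
  · show t7.2 = _
    simp only [k7d, k6g, k6d, k3g, k3d, k2g, k2d]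
    clear k1g k1d k2g k2d k3g k3d k4g k4d k5g k5d k6g k6d k7g k7d k8g k8d e1 e2 hflag hP hs1 hs2
    split_ifs <;> first | omega | (subst_vars; omega) | (subst_vars; tauto)

lemma pvInnerA_spec (x y w2 : List Char) (c1 : Char) (h1 : c1 ∈ x) :
    ∀ (l : List (Int × Char)), (∀ p ∈ l, p.2 ∈ y) →
    ∀ st, pvInv x y st →
    (pvInnerA w2 c1 l st).1
      = l.any (fun p => !(decide (p.1 > 0) && (PySem.List.pyGetD w2 (p.1 - 1) ' ' == p.2)) && pvP x y c1 p.2) ∧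
    ((pvInnerA w2 c1 l st).1 = false → pvInv x y (pvInnerA w2 c1 l st).2) := by
  intro l
  induction l with
  | nil => intro _ st h; exact ⟨rfl, fun _ => h⟩
  | cons p rest ih =>
    intro hl st h
    obtain ⟨k, c2⟩ := p
    have hc2 : c2 ∈ y := hl (k, c2) (by simp)
    have hrest : ∀ q ∈ rest, q.2 ∈ y := fun q hq => hl q (by simp [hq])
    obtain ⟨hf, hinv⟩ := pvStepA_spec x y st h c1 c2 h1 hc2
    by_cases hskip : (decide (k > 0) && (PySem.List.pyGetD w2 (k - 1) ' ' == c2)) = true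
    · have : pvInnerA w2 c1 ((k, c2) :: rest) st = pvInnerA w2 c1 rest st := by
        simp only [pvInnerA, hskip, if_true]
      rw [this, List.any_cons]
      obtain ⟨ih1, ih2⟩ := ih hrest st h
      refine ⟨?_, ih2⟩
      simp [hskip, ih1]
    · rcases hstep : pvStepA st c1 c2 with ⟨b, st'⟩
      rw [hstep] at hf hinv
      simp only at hf hinv
      subst hf
      have hun : pvInnerA w2 c1 ((k, c2) :: rest) st =
          (match pvStepA st c1 c2 with
           | (true, st') => (true, st')
           | (false, st') => pvInnerA w2 c1 rest st') := by
        simp only [pvInnerA, hskip, if_false, Bool.false_eq_true]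
      rw [hstep] at hun
      rcases hPv : pvP x y c1 c2 with _ | _
      · rw [hPv] at hun
        simp only at hun
        rw [hun, List.any_cons]
        obtain ⟨ih1, ih2⟩ := ih hrest st' (hinv hPv)
        refine ⟨?_, ih2⟩
        simp [hskip, hPv, ih1]
      · rw [hPv] at hun
        simp only at hun
        rw [hun, List.any_cons]
        refine ⟨?_, fun hfalse => by simp at hfalse⟩
        simp [hskip, hPv]

lemma pvOuterA_spec (x y w1 w2 : List Char) (hw2 : ∀ q ∈ PySem.List.enumerate w2, q.2 ∈ y) :
    ∀ (l : List (Int × Char)), (∀ p ∈ l, p.2 ∈ x) →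
    ∀ st, pvInv x y st →
    pvOuterA w1 w2 l st
      = l.any (fun p => !(decide (p.1 > 0) && (PySem.List.pyGetD w1 (p.1 - 1) ' ' == p.2)) &&
          (PySem.List.enumerate w2).any
            (fun q => !(decide (q.1 > 0) && (PySem.List.pyGetD w2 (q.1 - 1) ' ' == q.2)) && pvP x y p.2 q.2)) := by
  intro l
  induction l with
  | nil => intro _ st h; rfl
  | cons p rest ih =>
    intro hl st h
    obtain ⟨i, c1⟩ := p
    have hc1 : c1 ∈ x := hl (i, c1) (by simp)
    have hrest : ∀ q ∈ rest, q.2 ∈ x := fun q hq => hl q (by simp [hq])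
    by_cases hskip : (decide (i > 0) && (PySem.List.pyGetD w1 (i - 1) ' ' == c1)) = true
    · have : pvOuterA w1 w2 ((i, c1) :: rest) st = pvOuterA w1 w2 rest st := by
        simp only [pvOuterA, hskip, if_true]
      rw [this, List.any_cons, ih hrest st h]
      simp [hskip]
    · obtain ⟨in1, in2⟩ := pvInnerA_spec x y w2 c1 hc1 (PySem.List.enumerate w2) hw2 st h
      have hun : pvOuterA w1 w2 ((i, c1) :: rest) st =
          (match pvInnerA w2 c1 (PySem.List.enumerate w2) st with
           | (true, _) => true
           | (false, st') => pvOuterA w1 w2 rest st') := by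
        simp only [pvOuterA, hskip, if_false, Bool.false_eq_true]
      rcases hres : pvInnerA w2 c1 (PySem.List.enumerate w2) st with ⟨b, st'⟩
      rw [hres] at hun in1 in2
      simp only at in1 in2
      subst in1
      rcases hAny : (PySem.List.enumerate w2).any
          (fun q => !(decide (q.1 > 0) && (PySem.List.pyGetD w2 (q.1 - 1) ' ' == q.2)) && pvP x y c1 q.2) with _ | _
      · rw [hAny] at hun
        simp only at hun
        rw [hun, List.any_cons, ih hrest st' (in2 hAny), hAny, Bool.and_false, Bool.false_or]
      · rw [hAny] at hun
        simp only at hun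
        have hX : (decide (i > 0) && (PySem.List.pyGetD w1 (i - 1) ' ' == c1)) = false := by
          revert hskip; cases (decide (i > 0) && (PySem.List.pyGetD w1 (i - 1) ' ' == c1)) <;> simp
        rw [hun, List.any_cons, hAny, hX]
        simp

lemma pvAny_nonskip (s : List Char) (f : Char → Bool) :
    ((PySem.List.enumerate s).any
        (fun p => !(decide (p.1 > 0) && (PySem.List.pyGetD s (p.1 - 1) ' ' == p.2)) && f p.2)) = true
      ↔ ∃ c ∈ s, f c = true := by
  rw [List.any_eq_true]
  constructor
  · rintro ⟨p, hp, hv⟩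
    rw [PySem.List.mem_enumerate_iff] at hp
    obtain ⟨k, hk, rfl⟩ := hp
    rw [Bool.and_eq_true] at hv
    exact ⟨s[k], List.getElem_mem hk, hv.2⟩
  · rintro ⟨c, hc, hR⟩
    have hkl : s.findIdx (· == c) < s.length := List.findIdx_lt_length.2 ⟨c, hc, by simp⟩
    have hget : s[s.findIdx (· == c)] = c := by
      simpa using List.findIdx_getElem (p := (· == c)) (xs := s) (w := hkl)
    refine ⟨((0 : Int) + (s.findIdx (· == c) : Int), s[s.findIdx (· == c)]), ?_, ?_⟩
    · rw [PySem.List.mem_enumerate_iff]; exact ⟨_, hkl, rfl⟩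
    · rw [Bool.and_eq_true]
      refine ⟨?_, by rw [hget]; exact hR⟩
      rw [Bool.not_eq_eq_eq_not, Bool.not_true]
      rcases Nat.eq_zero_or_pos (s.findIdx (· == c)) with h0 | h0
      · simp [h0]
      · have hidx : ((0 : Int) + (s.findIdx (· == c) : Int)) - 1 = ((s.findIdx (· == c) - 1 : Nat) : Int) := by
          omega
        have hlt : s.findIdx (· == c) - 1 < s.length := by omega
        have hne : s[s.findIdx (· == c) - 1]'hlt ≠ c := by
          have h := List.not_of_lt_findIdx (p := (· == c)) (xs := s) (i := s.findIdx (· == c) - 1)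
            (by omega)
          simpa using h
        rw [Bool.and_eq_false_iff]
        right
        rw [hidx, PySem.List.pyGetD_natCast, List.getD_eq_getElem?_getD,
          List.getElem?_eq_getElem hlt, Option.getD_some]
        simp only [hget, beq_eq_false_iff_ne]
        exact hne

-- A = true  ↔  some pair of distinct characters passes pvP
lemma pvA_iff (word1 word2 : String) :
    isItPossible word1 word2 = true ↔
      ∃ c1 ∈ word1.toList, ∃ c2 ∈ word2.toList, pvP word1.toList word2.toList c1 c2 = true := by
  have hpx : (PySem.List.sorted word1.toList (fun c => c) false).Perm word1.toList :=
    PySem.List.sorted_perm _ _ _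
  have hpy : (PySem.List.sorted word2.toList (fun c => c) false).Perm word2.toList :=
    PySem.List.sorted_perm _ _ _
  set x := word1.toList with hx
  set y := word2.toList with hy
  set w1 := PySem.List.sorted x (fun c => c) false with hw1
  set w2 := PySem.List.sorted y (fun c => c) false with hw2
  have hkeys1 : (PySem.Set.ofList w1).Perm (PySem.Set.ofList x) :=
    (List.perm_ext_iff_of_nodup (PySem.Set.nodup_ofList _) (PySem.Set.nodup_ofList _)).2
      (fun a => by
        rw [PySem.Set.mem_ofList, PySem.Set.mem_ofList]
        exact ⟨fun h => hpx.mem_iff.1 h, fun h => hpx.mem_iff.2 h⟩)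
  have hkeys2 : (PySem.Set.ofList w2).Perm (PySem.Set.ofList y) :=
    (List.perm_ext_iff_of_nodup (PySem.Set.nodup_ofList _) (PySem.Set.nodup_ofList _)).2
      (fun a => by
        rw [PySem.Set.mem_ofList, PySem.Set.mem_ofList]
        exact ⟨fun h => hpy.mem_iff.1 h, fun h => hpy.mem_iff.2 h⟩)
  have hinv : pvInv x y (PySem.Dict.counter w1, PySem.Dict.counter w2,
      ((PySem.Dict.counter w1).keys.length : Int), ((PySem.Dict.counter w2).keys.length : Int)) := by
    refine ⟨fun c => ?_, fun c => ?_, ?_, ?_⟩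
    · simp [PySem.Dict.getD_counter, hpx.count_eq]
    · simp [PySem.Dict.getD_counter, hpy.count_eq]
    · simp only [PySem.Dict.keys_counter, pvD, hkeys1.length_eq]
    · simp only [PySem.Dict.keys_counter, pvD, hkeys2.length_eq]
  have hw2mem : ∀ q ∈ PySem.List.enumerate w2, q.2 ∈ y := by
    intro q hq
    rw [PySem.List.mem_enumerate_iff] at hq
    obtain ⟨k, hk, rfl⟩ := hq
    exact hpy.mem_iff.1 (List.getElem_mem hk)
  have hw1mem : ∀ q ∈ PySem.List.enumerate w1, q.2 ∈ x := by
    intro q hq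
    rw [PySem.List.mem_enumerate_iff] at hq
    obtain ⟨k, hk, rfl⟩ := hq
    exact hpx.mem_iff.1 (List.getElem_mem hk)
  have hA : isItPossible word1 word2 =
      (PySem.List.enumerate w1).any (fun p =>
        !(decide (p.1 > 0) && (PySem.List.pyGetD w1 (p.1 - 1) ' ' == p.2)) &&
        (PySem.List.enumerate w2).any (fun q =>
          !(decide (q.1 > 0) && (PySem.List.pyGetD w2 (q.1 - 1) ' ' == q.2)) && pvP x y p.2 q.2)) := by
    rw [isItPossible]
    exact pvOuterA_spec x y w1 w2 hw2mem (PySem.List.enumerate w1) hw1mem _ hinv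
  rw [hA,
    pvAny_nonskip w1 (fun c1 => (PySem.List.enumerate w2).any (fun q =>
      !(decide (q.1 > 0) && (PySem.List.pyGetD w2 (q.1 - 1) ' ' == q.2)) && pvP x y c1 q.2))]
  simp only [pvAny_nonskip, hpx.mem_iff, hpy.mem_iff]

-- ----- B side -----

lemma pvP_same (x y : List Char) (c : Char) : pvP x y c c = (pvD x == pvD y) := by
  simp [pvP]

lemma pvP_ne (x y : List Char) (c1 c2 : Char) (h : c1 ≠ c2) :
    pvP x y c1 c2 = true ↔ pvD x - pvG1 x y c1 = pvD y - pvG2 x y c2 := by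
  have hb : (c1 == c2) = false := by simp [h]
  have e2 : (x.contains c2 = true) ∨ (x.contains c2 = false) := by
    cases x.contains c2 <;> simp
  simp only [pvP, pvG1, pvG2, hb, Bool.false_eq_true, if_false, beq_iff_eq]
  split_ifs <;> omega

lemma pvG1_range (x y : List Char) (c : Char) : 0 ≤ pvG1 x y c ∧ pvG1 x y c ≤ 2 := by
  unfold pvG1; split_ifs <;> omega

lemma pvG2_range (x y : List Char) (c : Char) : 0 ≤ pvG2 x y c ∧ pvG2 x y c ≤ 2 := by
  unfold pvG2; split_ifs <;> omega

lemma pvNodupAllEq {α : Type} (l : List α) (b : α) (hn : l.Nodup) (h : ∀ a ∈ l, a = b)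
    (hne : l ≠ []) : l = [b] := by
  match l with
  | [] => exact absurd rfl hne
  | [a] => rw [h a (by simp)]
  | a :: c :: r =>
    exfalso
    have ha := h a (by simp)
    have hc := h c (by simp)
    rw [List.nodup_cons] at hn
    exact hn.1 (by rw [ha, ← hc]; simp)

lemma pvBucket (g : Char → Int) (l : List Char) (t : Int) :
    ((l.map (fun c => (c, g c))).filter (fun p => p.2 == t)).map Prod.fst
      = l.filter (fun c => g c == t) := by
  induction l with
  | nil => rfl
  | cons a l ih => by_cases h : (g a == t) = true <;> simp [h, ih]

-- B = true  ↔  the same existence of a passing pair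
lemma pvAlt_iff (word1 word2 : String) :
    isItPossible_alt word1 word2 = true ↔
      ∃ c1 ∈ word1.toList, ∃ c2 ∈ word2.toList, pvP word1.toList word2.toList c1 c2 = true := by
  set x := word1.toList with hx
  set y := word2.toList with hy
  have hsx : (((PySem.Dict.counter x).size : Nat) : Int) = pvD x := by
    simp [PySem.Dict.size, PySem.Dict.items_counter, pvD]
  have hsy : (((PySem.Dict.counter y).size : Nat) : Int) = pvD y := by
    simp [PySem.Dict.size, PySem.Dict.items_counter, pvD]
  have hcls1 : (PySem.Dict.counter x).items.map (fun p =>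
        (p.1, (if p.2 == 1 then (1 : Int) else 0) + (if y.contains p.1 then 0 else 1)))
      = (PySem.Set.ofList x).map (fun c => (c, pvG1 x y c)) := by
    rw [PySem.Dict.items_counter, List.map_map]
    simp [Function.comp, pvG1]
  have hcls2 : (PySem.Dict.counter y).items.map (fun p =>
        (p.1, (if p.2 == 1 then (1 : Int) else 0) + (if x.contains p.1 then 0 else 1)))
      = (PySem.Set.ofList y).map (fun c => (c, pvG2 x y c)) := by
    rw [PySem.Dict.items_counter, List.map_map]
    simp [Function.comp, pvG2]
  have hrange : PySem.List.pyRange 0 3 1 = [0, 1, 2] := by decide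
  have hB : isItPossible_alt word1 word2 =
      (if (pvD x == pvD y) && (PySem.Set.ofList x).any (fun c => y.contains c) then true
       else ([0, 1, 2] : List Int).any (fun t =>
         let s := t + pvD y - pvD x
         if 0 ≤ s ∧ s ≤ 2 then
           let b1 := (PySem.Set.ofList x).filter (fun c => pvG1 x y c == t)
           let b2 := (PySem.Set.ofList y).filter (fun c => pvG2 x y c == s)
           !b1.isEmpty && !b2.isEmpty && !(b1.length == 1 && b1 == b2)
         else false)) := by
    rw [isItPossible_alt]
    simp only [← hx, ← hy, hsx, hsy, PySem.Dict.keys_counter, PySem.Dict.contains_counter,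
      hcls1, hcls2, hrange, pvBucket]
  rw [hB]
  by_cases hE : ((pvD x == pvD y) && (PySem.Set.ofList x).any (fun c => y.contains c)) = true
  · rw [if_pos hE]
    rw [Bool.and_eq_true, List.any_eq_true] at hE
    obtain ⟨hd, c, hcS, hcy⟩ := hE
    refine ⟨fun _ => ⟨c, ?_, c, ?_, ?_⟩, fun _ => rfl⟩
    · exact (PySem.Set.mem_ofList _ _).1 hcS
    · exact (List.contains_iff_mem).1 hcy
    · rw [pvP_same]; exact hd
  · rw [if_neg hE]
    rw [List.any_eq_true]
    constructor
    · rintro ⟨t, _, hbody⟩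
      simp only at hbody
      by_cases hc : 0 ≤ t + pvD y - pvD x ∧ t + pvD y - pvD x ≤ 2
      · rw [if_pos hc] at hbody
        set s := t + pvD y - pvD x with hs
        simp only [Bool.and_eq_true, Bool.not_eq_eq_eq_not, Bool.not_true,
          List.isEmpty_eq_false_iff] at hbody
        obtain ⟨⟨hb1ne, hb2ne⟩, hguard⟩ := hbody
        obtain ⟨c1, hc1⟩ := List.exists_mem_of_ne_nil _ hb1ne
        obtain ⟨c2, hc2⟩ := List.exists_mem_of_ne_nil _ hb2ne
        rw [List.mem_filter] at hc1 hc2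
        obtain ⟨hc1S, hg1⟩ := hc1
        obtain ⟨hc2S, hg2⟩ := hc2
        rw [beq_iff_eq] at hg1 hg2
        by_cases hdist : ∃ a ∈ (PySem.Set.ofList x).filter (fun c => pvG1 x y c == t),
            ∃ b ∈ (PySem.Set.ofList y).filter (fun c => pvG2 x y c == s), a ≠ b
        · obtain ⟨a, haf, b, hbf, hab⟩ := hdist
          rw [List.mem_filter] at haf hbf
          obtain ⟨haS, hga⟩ := haf
          obtain ⟨hbS, hgb⟩ := hbf
          rw [beq_iff_eq] at hga hgb
          refine ⟨a, (PySem.Set.mem_ofList _ _).1 haS, b, (PySem.Set.mem_ofList _ _).1 hbS, ?_⟩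
          rw [pvP_ne x y a b hab, hga, hgb]
          omega
        · exfalso
          push Not at hdist
          have hall1 : ∀ a ∈ (PySem.Set.ofList x).filter (fun c => pvG1 x y c == t), a = c2 :=
            fun a ha => hdist a ha c2 (List.mem_filter.2 ⟨hc2S, by simp [hg2]⟩)
          have hall2 : ∀ b ∈ (PySem.Set.ofList y).filter (fun c => pvG2 x y c == s), b = c2 := by
            intro b hb
            have := hdist c1 (List.mem_filter.2 ⟨hc1S, by simp [hg1]⟩) b hb
            have hcc := hall1 c1 (List.mem_filter.2 ⟨hc1S, by simp [hg1]⟩)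
            rw [← this, hcc]
          have he1 : (PySem.Set.ofList x).filter (fun c => pvG1 x y c == t) = [c2] :=
            pvNodupAllEq _ c2 ((PySem.Set.nodup_ofList _).filter _) hall1 hb1ne
          have he2 : (PySem.Set.ofList y).filter (fun c => pvG2 x y c == s) = [c2] :=
            pvNodupAllEq _ c2 ((PySem.Set.nodup_ofList _).filter _) hall2 hb2ne
          rw [he1, he2] at hguard
          simp at hguard
      · rw [if_neg hc] at hbody
        exact absurd hbody (by simp)
    · rintro ⟨c1, hc1, c2, hc2, hP⟩
      by_cases hcc : c1 = c2
      · exfalso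
        subst hcc
        rw [pvP_same] at hP
        exact hE (by
          rw [Bool.and_eq_true]
          refine ⟨hP, List.any_eq_true.2 ⟨c1, (PySem.Set.mem_ofList _ _).2 hc1, ?_⟩⟩
          exact List.contains_iff_mem.2 hc2)
      · rw [pvP_ne x y c1 c2 hcc] at hP
        refine ⟨pvG1 x y c1, ?_, ?_⟩
        · have := pvG1_range x y c1
          simp only [List.mem_cons]
          omega
        · simp only
          have hg2r := pvG2_range x y c2
          have hseq : pvG1 x y c1 + pvD y - pvD x = pvG2 x y c2 := by omega
          rw [hseq, if_pos (by omega)]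
          have hm1 : c1 ∈ (PySem.Set.ofList x).filter (fun c => pvG1 x y c == pvG1 x y c1) :=
            List.mem_filter.2 ⟨(PySem.Set.mem_ofList _ _).2 hc1, by simp⟩
          have hm2 : c2 ∈ (PySem.Set.ofList y).filter (fun c => pvG2 x y c == pvG2 x y c2) :=
            List.mem_filter.2 ⟨(PySem.Set.mem_ofList _ _).2 hc2, by simp⟩
          simp only [Bool.and_eq_true, Bool.not_eq_eq_eq_not, Bool.not_true,
            List.isEmpty_eq_false_iff]
          refine ⟨⟨List.ne_nil_of_mem hm1, List.ne_nil_of_mem hm2⟩, ?_⟩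
          by_cases hlen : ((PySem.Set.ofList x).filter (fun c => pvG1 x y c == pvG1 x y c1)).length = 1
          · rw [Bool.and_eq_false_iff]
            right
            rw [beq_eq_false_iff_ne]
            intro hEQ
            obtain ⟨a, hla⟩ := List.length_eq_one_iff.1 hlen
            rw [hla] at hm1
            rw [← hEQ, hla] at hm2
            simp only [List.mem_singleton] at hm1 hm2
            exact hcc (hm1.trans hm2.symm)
          · rw [Bool.and_eq_false_iff]
            left
            simpa using hlen

lemma pvMain (word1 word2 : String) :
    isItPossible word1 word2 = isItPossible_alt word1 word2 := by
  rw [Bool.eq_iff_iff, pvA_iff, pvAlt_iff]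

-- ===== VERDICT (by name: the statement is the Claim_ definition above) =====
theorem isItPossible_spec : Claim_equal_isItPossible := by
  intro word1 word2 _
  exact pvMain word1 word2
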